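-- pv_equiv track=rewrite | github.com/luisalonso97/aoc_2025 | 02_Gift_Shop/main.py | generate_invalid_ids
-- ===== SOURCE A (Python) =====
-- def generate_invalid_ids(max_val: int) -> set[int]:
--     invalid_ids = set()
--     max_digits = len(str(max_val))
--
--     for pattern_len in range(1, max_digits // 2 + 1):
--         start_pat = 10 ** (pattern_len - 1)
--         end_pat = 10 ** pattern_len
--
--         for pat in range(start_pat, end_pat):
--             pat_str = str(pat)
--
--             current_str = pat_str * 2
--             while len(current_str) <= max_digits:
--                 val = int(current_str)
--                 if val <= max_val:
--                     invalid_ids.add(val)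
--                 current_str += pat_str
--
--     return invalid_ids
-- ===== SOURCE B (Python) =====
-- def _is_primitive(pat: int, pl: int) -> bool:
--     # pat (a pl-digit number) is primitive iff it is not a repetition of any
--     # shorter block whose length divides pl
--     for d in range(1, pl):
--         if pl % d == 0 and pat * (10 ** d - 1) == (pat // 10 ** (pl - d)) * (10 ** pl - 1):
--             return False
--     return True
--
--
-- def generate_invalid_ids(max_val: int) -> set[int]:
--     # Enumerate every periodic number exactly once, via its canonical
--     # (primitive pattern, repeat count) representation: no dedup set needed.
--     out = []
--     max_digits = len(str(max_val))
--
--     for pl in range(1, max_digits // 2 + 1):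
--         shift = 10 ** pl
--         for pat in range(shift // 10, shift):
--             if _is_primitive(pat, pl):
--                 val = pat * shift + pat
--                 digits = 2 * pl
--                 while digits <= max_digits:
--                     if val <= max_val:
--                         out.append(val)
--                     val = val * shift + pat
--                     digits += pl
--
--     return set(out)
-- ===== Notes on version B (the rewrite author's own statement) =====
-- stated objective: alternative
-- what changed: A generates every (pattern, repeat-count) pair, builds candidates by string repetition and deduplicates with a set (e.g. 1111 is produced both by '1'*4 and '11'*2); B enumerates each periodic number exactly once through its canonical representation -- only primitive (aperiodic) patterns, extended arithmetically -- so the dedup set disappears and the result is a plain append-only list.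
import Mathlib
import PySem

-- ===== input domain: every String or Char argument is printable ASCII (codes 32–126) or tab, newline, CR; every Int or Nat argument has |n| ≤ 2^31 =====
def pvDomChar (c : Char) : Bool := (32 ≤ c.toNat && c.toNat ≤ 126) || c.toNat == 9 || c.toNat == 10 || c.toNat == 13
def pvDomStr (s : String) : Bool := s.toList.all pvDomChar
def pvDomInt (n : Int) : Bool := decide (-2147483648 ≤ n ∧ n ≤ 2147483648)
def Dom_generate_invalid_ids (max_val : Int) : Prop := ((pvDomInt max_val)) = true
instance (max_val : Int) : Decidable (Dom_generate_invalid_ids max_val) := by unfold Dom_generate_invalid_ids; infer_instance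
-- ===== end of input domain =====

-- B enumerates each periodic number exactly once, via its canonical (primitive pattern,
-- repeat count) representation built arithmetically, so A's dedup set disappears; same result.

-- ===== PORT A =====
-- while len(current_str) <= max_digits: …  — ported with an explicit Nat fuel, a pure
-- totality guard: each iteration grows current_str by at least one character (str(pat) is
-- never empty), so max_digits+1 iterations always suffice and the guard never fires.
def pvWhileA (fuel : Nat) (max_digits max_val : Int) (pat_str cur : List Char)
    (acc : PySem.Set Int) : PySem.Set Int :=
  match fuel with
  | 0 => acc
  | n + 1 =>
    if (cur.length : Int) ≤ max_digits then
      -- val = int(current_str): int() never raises here (digits only), so getD 0 is exact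
      let val := (PySem.Int.ofChars? cur).getD 0
      pvWhileA n max_digits max_val pat_str (cur ++ pat_str)
        (if val ≤ max_val then PySem.Set.add acc val else acc)
    else acc

def generate_invalid_ids (max_val : Int) : List Int :=
  let max_digits : Int := PySem.Str.len (PySem.Int.toStr max_val)
  (PySem.List.pyRange 1 (PySem.Int.floordiv max_digits 2 + 1) 1).foldl
    (fun invalid_ids pattern_len =>
      -- pattern_len ≥ 1 in the range, so .toNat in the exponents is exact
      let start_pat : Int := 10 ^ (pattern_len - 1).toNat
      let end_pat : Int := 10 ^ pattern_len.toNat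
      (PySem.List.pyRange start_pat end_pat 1).foldl
        (fun invalid_ids pat =>
          let pat_str := (PySem.Int.toStr pat).toList
          pvWhileA (max_digits + 1).toNat max_digits max_val pat_str (pat_str ++ pat_str)
            invalid_ids)
        invalid_ids)
    PySem.Set.empty

-- ===== PORT B =====
-- _is_primitive(pat, pl): no block length d properly dividing pl repeats to pat
def pvIsPrim (pl pat : Int) : Bool :=
  (PySem.List.pyRange 1 pl 1).all fun d =>
    !(PySem.Int.mod pl d == 0 &&
      pat * (10 ^ d.toNat - 1) ==
        PySem.Int.floordiv pat (10 ^ (pl - d).toNat) * (10 ^ pl.toNat - 1))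

-- while digits <= max_digits: …  — same explicit Nat fuel as a totality guard (pl ≥ 1,
-- so digits grows every iteration and max_digits+1 iterations always suffice)
def pvWhileC (fuel : Nat) (max_digits max_val shift pat plen val digits : Int)
    (out : List Int) : List Int :=
  match fuel with
  | 0 => out
  | n + 1 =>
    if digits ≤ max_digits then
      pvWhileC n max_digits max_val shift pat plen (val * shift + pat) (digits + plen)
        (if val ≤ max_val then out ++ [val] else out)
    else out

def generate_invalid_ids_alt (max_val : Int) : List Int :=
  let max_digits : Int := PySem.Str.len (PySem.Int.toStr max_val)
  PySem.Set.ofList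
    ((PySem.List.pyRange 1 (PySem.Int.floordiv max_digits 2 + 1) 1).foldl
      (fun out pl =>
        let shift : Int := 10 ^ pl.toNat
        (PySem.List.pyRange (PySem.Int.floordiv shift 10) shift 1).foldl
          (fun out pat =>
            if pvIsPrim pl pat then
              pvWhileC (max_digits + 1).toNat max_digits max_val shift pat pl
                (pat * shift + pat) (2 * pl) out
            else out)
          out)
      [])

-- ===== PRECONDITION & SPEC =====
def Spec_generate_invalid_ids (max_val : Int) (out : List Int) : Prop := out = generate_invalid_ids_alt max_val
instance (max_val : Int) (out : List Int) : Decidable (Spec_generate_invalid_ids max_val out) := by unfold Spec_generate_invalid_ids; infer_instance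

-- ===== CLAIM (what is proved, stated in full; the proofs are below) =====
def Claim_equal_generate_invalid_ids : Prop := ∀ (max_val : Int), Dom_generate_invalid_ids max_val → Spec_generate_invalid_ids max_val (generate_invalid_ids max_val)

-- ===== LEMMAS AND PROOFS =====

-- ---------- Part 1: A's string loop equals an arithmetic accumulation (pvMid) ----------

-- arithmetic mirror of A's inner while loop (set-building), same fuel discipline
def pvWhileB (fuel : Nat) (max_digits max_val shift pat plen val digits : Int)
    (acc : PySem.Set Int) : PySem.Set Int :=
  match fuel with
  | 0 => acc
  | n + 1 =>
    if digits ≤ max_digits then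
      pvWhileB n max_digits max_val shift pat plen (val * shift + pat) (digits + plen)
        (if val ≤ max_val then PySem.Set.add acc val else acc)
    else acc

-- arithmetic middle form of A: same loops as A, value kept as an integer accumulator
def pvMid (max_val : Int) : List Int :=
  let max_digits : Int := PySem.Str.len (PySem.Int.toStr max_val)
  (PySem.List.pyRange 1 (PySem.Int.floordiv max_digits 2 + 1) 1).foldl
    (fun invalid_ids pattern_len =>
      let shift : Int := 10 ^ pattern_len.toNat
      (PySem.List.pyRange (PySem.Int.floordiv shift 10) shift 1).foldl
        (fun invalid_ids pat =>
          pvWhileB (max_digits + 1).toNat max_digits max_val shift pat pattern_len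
            (pat * shift + pat) (2 * pattern_len) invalid_ids)
        invalid_ids)
    PySem.Set.empty

-- Clone of the (private) digit-scanner inside PySem.Int.ofChars?, captured below by unification.
def pvDvGo : List Char → Bool → Nat → Option Nat
  | [], afterDigit, acc => if afterDigit = true then some acc else none
  | c :: rest, afterDigit, acc =>
    if c.isDigit = true then pvDvGo rest true (acc * 10 + (c.toNat - '0'.toNat))
    else if c = '_' ∧ afterDigit = true then
      match rest with
      | d :: _tail => if d.isDigit = true then pvDvGo rest false acc else none
      | [] => none
    else none

def pvDv : List Char → Option Nat
  | [] => none
  | cs => pvDvGo cs false 0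

def pvMyOfChars? (s : List Char) : Option Int :=
  have cs := (List.dropWhile PySem.Int.isIntSpace (List.dropWhile PySem.Int.isIntSpace s).reverse).reverse
  match cs with
  | '-' :: ds => Option.map (fun n => -n) (do let a ← pvDv ds; pure (a : Int))
  | '+' :: ds => Option.map (fun n => n) (do let a ← pvDv ds; pure (a : Int))
  | ds => Option.map (fun n => n) (do let a ← pvDv ds; pure (a : Int))

theorem pv_go_char (g : List Char → Bool → Nat → Option Nat)
    (hnil : ∀ b a, g [] b a = if b = true then some a else none)
    (hc1 : ∀ c b a, g [c] b a = if c.isDigit = true then g [] true (a * 10 + (c.toNat - '0'.toNat))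
        else if c = '_' ∧ b = true then none else none)
    (hc2 : ∀ c d t b a, g (c :: d :: t) b a = if c.isDigit = true then g (d :: t) true (a * 10 + (c.toNat - '0'.toNat))
        else if c = '_' ∧ b = true then (if d.isDigit = true then g (d :: t) false a else none) else none) :
    ∀ cs b a, g cs b a = pvDvGo cs b a := by
  intro cs
  induction cs with
  | nil => intro b a; rw [hnil]; rfl
  | cons c rest ih =>
    intro b a
    cases rest with
    | nil => rw [hc1]; simp [pvDvGo, hnil]
    | cons d t => rw [hc2, ih, ih]; rfl

theorem pv_dv_char (dvp : List Char → Option Nat) (g : List Char → Bool → Nat → Option Nat)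
    (hdc2 : ∀ c d t, dvp (c :: d :: t) = if c.isDigit = true then g (d :: t) true (0 * 10 + (c.toNat - '0'.toNat))
        else if c = '_' ∧ false = true then (if d.isDigit = true then g (d :: t) false 0 else none) else none)
    (hdc1 : ∀ c, dvp [c] = if c.isDigit = true then g [] true (0 * 10 + (c.toNat - '0'.toNat))
        else if c = '_' ∧ false = true then none else none)
    (hd0 : dvp [] = none)
    (hnil : ∀ b a, g [] b a = if b = true then some a else none)
    (hc1 : ∀ c b a, g [c] b a = if c.isDigit = true then g [] true (a * 10 + (c.toNat - '0'.toNat))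
        else if c = '_' ∧ b = true then none else none)
    (hc2 : ∀ c d t b a, g (c :: d :: t) b a = if c.isDigit = true then g (d :: t) true (a * 10 + (c.toNat - '0'.toNat))
        else if c = '_' ∧ b = true then (if d.isDigit = true then g (d :: t) false a else none) else none) :
    ∀ cs, dvp cs = pvDv cs := by
  have hg := pv_go_char g hnil hc1 hc2
  intro cs
  match cs with
  | [] => rw [hd0]; rfl
  | [c] => rw [hdc1]; simp only [hg]; simp [pvDv, pvDvGo]
  | c :: d :: t => rw [hdc2]; simp only [hg]; simp only [pvDv]; conv_rhs => rw [pvDvGo]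

theorem pv_map_bind_congr (dvp : List Char → Option Nat) (h : ∀ cs, dvp cs = pvDv cs)
    (f : Int → Int) (k : Nat → Option Int) (ds : List Char) :
    Option.map f (Bind.bind (dvp ds) k) = Option.map f (Bind.bind (pvDv ds) k) := by rw [h]

theorem pv_ofChars_eq_my (s : List Char) : PySem.Int.ofChars? s = pvMyOfChars? s := by
  unfold PySem.Int.ofChars? pvMyOfChars?
  generalize (List.dropWhile PySem.Int.isIntSpace (List.dropWhile PySem.Int.isIntSpace s).reverse).reverse = cs
  dsimp only
  split
  · apply pv_map_bind_congr
    apply pv_dv_char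
    case hdc2 => intro c d t; conv_lhs => whnf
                 rfl
    case hdc1 => intro c; conv_lhs => whnf
                 rfl
    case hd0 => rfl
    case hnil => intro b a; rfl
    case hc1 => intro c b a; rfl
    case hc2 => intro c d t b a; rfl
  · apply pv_map_bind_congr
    apply pv_dv_char
    case hdc2 => intro c d t; conv_lhs => whnf
                 rfl
    case hdc1 => intro c; conv_lhs => whnf
                 rfl
    case hd0 => rfl
    case hnil => intro b a; rfl
    case hc1 => intro c b a; rfl
    case hc2 => intro c d t b a; rfl
  · rename_i h1 h2
    split
    · exact absurd rfl (h1 _)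
    · exact absurd rfl (h2 _)
    · apply pv_map_bind_congr
      apply pv_dv_char
      case hdc2 => intro c d t; conv_lhs => whnf
                   rfl
      case hdc1 => intro c; conv_lhs => whnf
                   rfl
      case hd0 => rfl
      case hnil => intro b a; rfl
      case hc1 => intro c b a; rfl
      case hc2 => intro c d t b a; rfl

-- decimal value of a digit string, most-significant first (Horner)
def pvHorn (cs : List Char) : Nat :=
  cs.foldl (fun a c => a * 10 + (c.toNat - '0'.toNat)) 0

theorem pv_horn_foldl (t : List Char) : ∀ a : Nat,
    t.foldl (fun a c => a * 10 + (c.toNat - '0'.toNat)) a = a * 10 ^ t.length + pvHorn t := by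
  induction t with
  | nil => intro a; simp [pvHorn]
  | cons c t ih =>
    intro a
    have h2 : pvHorn (c :: t) = (c.toNat - '0'.toNat) * 10 ^ t.length + pvHorn t := by
      show t.foldl _ (0 * 10 + (c.toNat - '0'.toNat)) = _
      rw [ih]
      ring_nf
    show t.foldl _ (a * 10 + (c.toNat - '0'.toNat)) = _
    rw [ih, h2]
    simp only [List.length_cons]
    ring

theorem pv_horn_append (s t : List Char) :
    pvHorn (s ++ t) = pvHorn s * 10 ^ t.length + pvHorn t := by
  unfold pvHorn
  rw [List.foldl_append]
  exact pv_horn_foldl t _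

theorem pv_dvGo_digits (cs : List Char) : ∀ (b : Bool) (a : Nat),
    (∀ c ∈ cs, c.isDigit = true) → (cs = [] → b = true) →
    pvDvGo cs b a = some (cs.foldl (fun a c => a * 10 + (c.toNat - '0'.toNat)) a) := by
  induction cs with
  | nil => intro b a _ hb; simp [pvDvGo, hb rfl]
  | cons c t ih =>
    intro b a hd _
    have hc : c.isDigit = true := hd c (by simp)
    cases t with
    | nil => simp [pvDvGo, hc]
    | cons d t' =>
      show pvDvGo (c :: d :: t') b a = _
      rw [pvDvGo]
      simp only [hc, if_true]
      rw [ih true _ (fun x hx => hd x (by simp [hx])) (by simp)]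
      rfl

theorem pv_dv_digits (cs : List Char) (hne : cs ≠ []) (hd : ∀ c ∈ cs, c.isDigit = true) :
    pvDv cs = some (pvHorn cs) := by
  match cs with
  | c :: t =>
    show pvDvGo (c :: t) false 0 = _
    rw [pv_dvGo_digits (c :: t) false 0 hd (by simp)]
    rfl

theorem pv_dropWhile_nospace (cs : List Char) (hd : ∀ c ∈ cs, c.isDigit = true) :
    List.dropWhile PySem.Int.isIntSpace cs = cs := by
  cases cs with
  | nil => rfl
  | cons c t =>
    have hc : c.isDigit = true := hd c (by simp)
    have hs : PySem.Int.isIntSpace c = false := by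
      by_cases h : PySem.Int.isIntSpace c = true
      · exfalso
        unfold PySem.Int.isIntSpace at h
        simp only [Bool.or_eq_true, decide_eq_true_eq] at h
        rcases h with ((((h | h) | h) | h) | h) | h <;> subst h <;> exact absurd hc (by decide)
      · simpa using h
    simp [hs]

theorem pv_ofChars_digits (cs : List Char) (hne : cs ≠ []) (hd : ∀ c ∈ cs, c.isDigit = true) :
    PySem.Int.ofChars? cs = some ((pvHorn cs : Int)) := by
  rw [pv_ofChars_eq_my]
  unfold pvMyOfChars?
  have hrev : ∀ c ∈ cs.reverse, c.isDigit = true := fun c hc => hd c (List.mem_reverse.mp hc)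
  rw [pv_dropWhile_nospace cs hd, pv_dropWhile_nospace cs.reverse hrev, List.reverse_reverse]
  dsimp only
  split
  · exact absurd (hd _ List.mem_cons_self) (by decide)
  · exact absurd (hd _ List.mem_cons_self) (by decide)
  · rw [pv_dv_digits cs hne hd]
    rfl

theorem pv_toDigitsCore_eq (f : Nat) : ∀ (n : Nat) (l : List Char), 0 < n → n < f →
    Nat.toDigitsCore 10 f n l = ((Nat.digits 10 n).map Nat.digitChar).reverse ++ l := by
  induction f with
  | zero => intro n l h1 h2; omega
  | succ f ih =>
    intro n l h1 h2
    rw [Nat.toDigitsCore]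
    by_cases h10 : n / 10 = 0
    · have hn : n < 10 := by omega
      simp only [h10, if_true]
      rw [Nat.digits_def' (by norm_num : 1 < 10) h1]
      rw [Nat.mod_eq_of_lt hn, h10]
      simp
    · simp only [h10, if_false]
      rw [ih (n / 10) _ (Nat.pos_of_ne_zero h10) (by omega)]
      rw [Nat.digits_def' (by norm_num : 1 < 10) h1]
      simp

theorem pv_toDigits_eq (n : Nat) (h : 0 < n) :
    Nat.toDigits 10 n = ((Nat.digits 10 n).map Nat.digitChar).reverse := by
  show Nat.toDigitsCore 10 (n + 1) n [] = _
  rw [pv_toDigitsCore_eq (n + 1) n [] h (by omega)]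
  simp

theorem pv_digitChar_isDigit (d : Nat) (h : d < 10) : (Nat.digitChar d).isDigit = true := by
  interval_cases d <;> decide

theorem pv_digitChar_val (d : Nat) (h : d < 10) : (Nat.digitChar d).toNat - 48 = d := by
  interval_cases d <;> decide

theorem pv_horn_digits_list (ds : List Nat) (h : ∀ d ∈ ds, d < 10) :
    pvHorn ((ds.map Nat.digitChar).reverse) = Nat.ofDigits 10 ds := by
  induction ds with
  | nil => rfl
  | cons d t ih =>
    simp only [List.map_cons, List.reverse_cons]
    rw [pv_horn_append, ih (fun x hx => h x (by simp [hx]))]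
    have hd : d < 10 := h d (by simp)
    have : pvHorn [Nat.digitChar d] = d := by
      show 0 * 10 + (d.digitChar.toNat - '0'.toNat) = d
      simpa using pv_digitChar_val d hd
    rw [this, Nat.ofDigits_cons]
    simp
    ring

theorem pv_toChars_spec (pat : Int) (hpos : 0 < pat) :
    PySem.Int.toChars pat = ((Nat.digits 10 pat.toNat).map Nat.digitChar).reverse ∧
    (∀ c ∈ PySem.Int.toChars pat, c.isDigit = true) ∧
    PySem.Int.toChars pat ≠ [] ∧
    (pvHorn (PySem.Int.toChars pat) : Int) = pat := by
  have h1 : PySem.Int.toChars pat = Nat.toDigits 10 pat.toNat := by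
    unfold PySem.Int.toChars
    rw [if_neg (by omega)]
  have hn : 0 < pat.toNat := by omega
  have h2 := pv_toDigits_eq pat.toNat hn
  refine ⟨h1.trans h2, ?_, ?_, ?_⟩
  · intro c hc
    rw [h1, h2] at hc
    simp only [List.mem_reverse, List.mem_map] at hc
    obtain ⟨d, hd, rfl⟩ := hc
    exact pv_digitChar_isDigit d (Nat.digits_lt_base (by norm_num) hd)
  · rw [h1, h2]
    simp [Nat.digits_ne_nil_iff_ne_zero, Nat.pos_iff_ne_zero.mp hn]
  · rw [h1, h2, pv_horn_digits_list _ (fun d hd => Nat.digits_lt_base (by norm_num) hd)]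
    rw [Nat.ofDigits_digits]
    omega

theorem pv_toChars_length (pat : Int) (L : Nat) (hL : 0 < L)
    (hlo : (10 : Int) ^ (L - 1) ≤ pat) (hhi : pat < (10 : Int) ^ L) :
    (PySem.Int.toChars pat).length = L := by
  have hpos : 0 < pat := lt_of_lt_of_le (by positivity) hlo
  have h1 : PySem.Int.toChars pat = ((Nat.digits 10 pat.toNat).map Nat.digitChar).reverse :=
    (pv_toChars_spec pat hpos).1
  have hlo' : 10 ^ (L - 1) ≤ pat.toNat := by
    have : ((10 : Nat) ^ (L - 1) : Int) ≤ pat := by push_cast; exact hlo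
    omega
  have hhi' : pat.toNat < 10 ^ L := by
    have : pat < ((10 : Nat) ^ L : Int) := by push_cast; exact hhi
    omega
  have hlog : Nat.log 10 pat.toNat = L - 1 := by
    apply Nat.log_eq_of_pow_le_of_lt_pow hlo'
    have : L - 1 + 1 = L := by omega
    rw [this]; exact hhi'
  rw [h1]
  simp only [List.length_reverse, List.length_map]
  rw [Nat.length_digits 10 pat.toNat (by norm_num) (by omega), hlog]
  omega

theorem pvWhileA_exit (n : Nat) (d mv : Int) (ps cur : List Char) (acc : PySem.Set Int)
    (h : ¬ ((cur.length : Int) ≤ d)) : pvWhileA n d mv ps cur acc = acc := by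
  cases n with
  | zero => rfl
  | succ m => simp [pvWhileA, h]

theorem pvWhileB_exit (n : Nat) (maxd mv shift pat plen val digits : Int)
    (acc : PySem.Set Int) (h : ¬ (digits ≤ maxd)) :
    pvWhileB n maxd mv shift pat plen val digits acc = acc := by
  cases n with
  | zero => rfl
  | succ m => simp [pvWhileB, h]

theorem pvWhileC_exit (n : Nat) (maxd mv shift pat plen val digits : Int)
    (out : List Int) (h : ¬ (digits ≤ maxd)) :
    pvWhileC n maxd mv shift pat plen val digits out = out := by
  cases n with
  | zero => rfl
  | succ m => simp [pvWhileC, h]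

theorem pv_while_bridge (d mv : Int) (ps : List Char) (pat plen : Int)
    (hps : ps ≠ []) (hdig : ∀ c ∈ ps, c.isDigit = true) (hplen : 0 < plen)
    (hlen : (ps.length : Int) = plen) (hval : (pvHorn ps : Int) = pat) :
    ∀ (nA nB : Nat) (cur : List Char) (acc : PySem.Set Int),
      (d + 1 - cur.length).toNat ≤ nA → (d + 1 - cur.length).toNat ≤ nB →
      cur ≠ [] → (∀ c ∈ cur, c.isDigit = true) →
      pvWhileA nA d mv ps cur acc =
        pvWhileB nB d mv (10 ^ plen.toNat) pat plen (pvHorn cur) (cur.length) acc := by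
  intro nA
  induction nA with
  | zero =>
    intro nB cur acc hA hB hne hcd
    have hgt : ¬ ((cur.length : Int) ≤ d) := by omega
    rw [pvWhileA_exit _ _ _ _ _ _ hgt, pvWhileB_exit _ _ _ _ _ _ _ _ _ hgt]
  | succ nA ih =>
    intro nB cur acc hA hB hne hcd
    by_cases hcond : (cur.length : Int) ≤ d
    · obtain ⟨nB', rfl⟩ : ∃ m, nB = m + 1 := ⟨nB - 1, by omega⟩
      simp only [pvWhileA, pvWhileB]
      rw [if_pos hcond, if_pos hcond]
      have hparse : PySem.Int.ofChars? cur = some ((pvHorn cur : Int)) := pv_ofChars_digits cur hne hcd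
      simp only [hparse, Option.getD_some]
      have hpslen : 0 < ps.length := List.length_pos_iff.mpr hps
      have hrec := ih nB' (cur ++ ps)
        (if (pvHorn cur : Int) ≤ mv then PySem.Set.add acc (pvHorn cur) else acc)
        (by simp only [List.length_append]; omega)
        (by simp only [List.length_append]; omega)
        (by simp [hne])
        (by intro c hc; rcases List.mem_append.mp hc with h | h
            exacts [hcd c h, hdig c h])
      rw [hrec]
      have hlenN : ps.length = plen.toNat := by omega
      have hv : ((pvHorn (cur ++ ps) : Nat) : Int) = (pvHorn cur : Int) * 10 ^ plen.toNat + pat := by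
        rw [pv_horn_append, hlenN]
        push_cast
        rw [hval]
      have hl2 : (((cur ++ ps).length : Nat) : Int) = (cur.length : Int) + plen := by
        simp only [List.length_append]
        push_cast
        omega
      rw [hv, hl2]
    · rw [pvWhileA_exit _ _ _ _ _ _ hcond, pvWhileB_exit _ _ _ _ _ _ _ _ _ hcond]

theorem pv_start_eq (plen : Int) (h : 0 < plen) :
    PySem.Int.floordiv ((10 : Int) ^ plen.toNat) 10 = 10 ^ (plen - 1).toNat := by
  have hsplit : plen.toNat = (plen - 1).toNat + 1 := by omega
  rw [hsplit, pow_succ, PySem.Int.floordiv_eq_ediv_of_pos (by norm_num)]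
  exact Int.mul_ediv_cancel _ (by norm_num)

theorem pv_A_eq_mid (mv : Int) : generate_invalid_ids mv = pvMid mv := by
  unfold generate_invalid_ids pvMid
  apply PySem.List.foldl_congr_mem
  intro acc plen hplen
  have h1 : 1 ≤ plen := (PySem.List.mem_pyRange_one.mp hplen).1
  show List.foldl _ _ _ = List.foldl _ _ _
  rw [pv_start_eq plen (by omega)]
  apply PySem.List.foldl_congr_mem
  intro acc2 pat hpat
  obtain ⟨hlo, hhi⟩ := PySem.List.mem_pyRange_one.mp hpat
  rw [PySem.Int.toList_toStr]
  set d : Int := PySem.Str.len (PySem.Int.toStr mv) with hd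
  set L : Nat := plen.toNat with hL
  have hLpos : 0 < L := by omega
  have hL1 : (plen - 1).toNat = L - 1 := by omega
  have hpos : 0 < pat := lt_of_lt_of_le (by positivity) (hL1 ▸ hlo)
  obtain ⟨_, hdig, hps, hval⟩ := pv_toChars_spec pat hpos
  have hlen : (PySem.Int.toChars pat).length = L :=
    pv_toChars_length pat L hLpos (by rw [← hL1]; exact hlo) hhi
  have hlenI : ((PySem.Int.toChars pat).length : Int) = plen := by rw [hlen]; omega
  have hbridge := pv_while_bridge d mv (PySem.Int.toChars pat) pat plen hps hdig (by omega)
    hlenI hval ((d + 1).toNat) ((d + 1).toNat)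
    (PySem.Int.toChars pat ++ PySem.Int.toChars pat) acc2 (by omega) (by omega)
    (by simp [hps])
    (by intro c hc; rcases List.mem_append.mp hc with h | h <;> exact hdig c h)
  rw [hbridge]
  have hv2 : ((pvHorn (PySem.Int.toChars pat ++ PySem.Int.toChars pat) : Nat) : Int) =
      pat * 10 ^ L + pat := by
    rw [pv_horn_append, hlen]
    push_cast
    rw [hval]
  have hl2 : (((PySem.Int.toChars pat ++ PySem.Int.toChars pat).length : Nat) : Int) = 2 * plen := by
    simp only [List.length_append, hlen]
    push_cast
    omega
  rw [hv2, hl2]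

-- ---------- Part 2: repunit arithmetic ----------

-- pvSN t n = the "spread" multiplier 1 + 10^t + … + 10^(t(n-1)); x * pvSN t n is the
-- t-digit block x repeated n times
def pvSN (t n : Nat) : Int := ∑ i ∈ Finset.range n, ((10 : Int) ^ t) ^ i

theorem pvSN_succ (t n : Nat) : pvSN t (n + 1) = 10 ^ t * pvSN t n + 1 := by
  unfold pvSN; rw [geom_sum_succ]

theorem pvSN_nonneg (t n : Nat) : 0 ≤ pvSN t n :=
  Finset.sum_nonneg (fun i _ => by positivity)

theorem pvSN_pos (t n : Nat) (hn : 0 < n) : 0 < pvSN t n := by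
  obtain ⟨m, rfl⟩ : ∃ m, n = m + 1 := ⟨n - 1, by omega⟩
  have := pvSN_nonneg t m
  rw [pvSN_succ]
  positivity

theorem pvSN_mul_eq (t n : Nat) : ((10 : Int) ^ t - 1) * pvSN t n = 10 ^ (t * n) - 1 := by
  have h := geom_sum_mul ((10 : Int) ^ t) n
  unfold pvSN
  rw [← pow_mul] at h
  linarith [h]

theorem pvSN_comp (d p k : Nat) (hd : 0 < d) (hdvd : d ∣ p) :
    pvSN d (p / d) * pvSN p k = pvSN d (p / d * k) := by
  have h10 : ((10 : Int) ^ d - 1) ≠ 0 := by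
    have : (10 : Int) ^ 1 ≤ 10 ^ d := pow_le_pow_right₀ (by norm_num) hd
    simp at this; omega
  apply mul_left_cancel₀ h10
  rw [← mul_assoc, pvSN_mul_eq, Nat.mul_div_cancel' hdvd, pvSN_mul_eq, pvSN_mul_eq,
    ← Nat.mul_assoc, Nat.mul_div_cancel' hdvd]

theorem pvSN_lb (t n : Nat) (hn : 1 ≤ n) : (10 : Int) ^ (t * (n - 1)) ≤ pvSN t n := by
  have h := Finset.single_le_sum (f := fun i => ((10 : Int) ^ t) ^ i)
    (fun i _ => by positivity) (Finset.mem_range.mpr (by omega : n - 1 < n))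
  dsimp only at h
  rw [← pow_mul] at h
  exact h

theorem pv_rep_lb (t n : Nat) (x : Int) (ht : 0 < t) (hn : 1 ≤ n)
    (hx1 : (10 : Int) ^ (t - 1) ≤ x) :
    (10 : Int) ^ (t * n - 1) ≤ x * pvSN t n := by
  have h1 : (10 : Int) ^ (t - 1) * 10 ^ (t * (n - 1)) ≤ x * pvSN t n :=
    mul_le_mul hx1 (pvSN_lb t n hn) (by positivity) (le_trans (by positivity) hx1)
  calc (10 : Int) ^ (t * n - 1) = 10 ^ (t - 1 + t * (n - 1)) := by
        congr 1
        obtain ⟨m, rfl⟩ : ∃ m, n = m + 1 := ⟨n - 1, by omega⟩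
        simp [Nat.mul_succ, Nat.mul_add]
        omega
    _ = 10 ^ (t - 1) * 10 ^ (t * (n - 1)) := by rw [pow_add]
    _ ≤ x * pvSN t n := h1

theorem pv_rep_ub (t n : Nat) (x : Int) (hn : 1 ≤ n) (hx2 : x < 10 ^ t) :
    x * pvSN t n < (10 : Int) ^ (t * n) := by
  have h1 : x * pvSN t n ≤ ((10 : Int) ^ t - 1) * pvSN t n :=
    mul_le_mul_of_nonneg_right (by omega) (pvSN_nonneg t n)
  rw [pvSN_mul_eq] at h1
  omega

theorem pv_len_unique (a b : Nat) (v : Int)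
    (h1 : (10 : Int) ^ (a - 1) ≤ v) (h2 : v < 10 ^ a)
    (h3 : (10 : Int) ^ (b - 1) ≤ v) (h4 : v < 10 ^ b) : a = b := by
  by_contra hne
  rcases Nat.lt_or_ge a b with h | h
  · have : (10 : Int) ^ a ≤ 10 ^ (b - 1) := pow_le_pow_right₀ (by norm_num) (by omega)
    omega
  · have hlt : b < a := by omega
    have : (10 : Int) ^ b ≤ 10 ^ (a - 1) := pow_le_pow_right₀ (by norm_num) (by omega)
    omega

theorem pv_floor_block (d m : Nat) (c : Int) (hd : 0 < d) (hm : 1 ≤ m)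
    (hc1 : (10 : Int) ^ (d - 1) ≤ c) (hc2 : c < 10 ^ d) :
    c * pvSN d m / (10 : Int) ^ (d * (m - 1)) = c := by
  have hc0 : 0 ≤ c := le_trans (by positivity) hc1
  have hsplit : pvSN d m = pvSN d (m - 1) + (10 : Int) ^ (d * (m - 1)) := by
    conv_lhs => rw [show m = (m - 1) + 1 by omega]
    unfold pvSN
    rw [Finset.sum_range_succ, ← pow_mul]
  have hr0 : 0 ≤ c * pvSN d (m - 1) := mul_nonneg hc0 (pvSN_nonneg _ _)
  have hrlt : c * pvSN d (m - 1) < (10 : Int) ^ (d * (m - 1)) := by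
    rcases Nat.eq_zero_or_pos (m - 1) with h0 | hpos
    · rw [h0]; simp [pvSN]
    · exact pv_rep_ub d (m - 1) c hpos hc2
  have hx : c * pvSN d m = c * pvSN d (m - 1) + (10 : Int) ^ (d * (m - 1)) * c := by
    rw [hsplit]; ring
  rw [hx, Int.add_mul_ediv_left _ c (by positivity),
    Int.ediv_eq_zero_of_lt hr0 hrlt, zero_add]

theorem pv_decomp (t L : Nat) (v : Int) (ht : 0 < t) (hdvd : t ∣ L) (hL : 0 < L)
    (hv1 : (10 : Int) ^ (L - 1) ≤ v) (hv2 : v < 10 ^ L)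
    (hdiv : ((10 : Int) ^ L - 1) ∣ v * ((10 : Int) ^ t - 1)) :
    ∃ c : Int, (10 : Int) ^ (t - 1) ≤ c ∧ c < 10 ^ t ∧ v = c * pvSN t (L / t) := by
  obtain ⟨c, hc⟩ := hdiv
  have htL : t ≤ L := Nat.le_of_dvd hL hdvd
  have htdiv : t * (L / t) = L := Nat.mul_div_cancel' hdvd
  have hNfact : (10 : Int) ^ L - 1 = ((10 : Int) ^ t - 1) * pvSN t (L / t) := by
    rw [pvSN_mul_eq, htdiv]
  have ht1 : (0 : Int) < 10 ^ t - 1 := by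
    have : (10 : Int) ^ 1 ≤ 10 ^ t := pow_le_pow_right₀ (by norm_num) ht
    simp at this; omega
  have hveq : v = c * pvSN t (L / t) := by
    apply mul_right_cancel₀ (a := v) (b := (10 : Int) ^ t - 1) (by omega)
    rw [hc, hNfact]; ring
  have hSlb : (10 : Int) ^ (L - t) ≤ pvSN t (L / t) := by
    have h := pvSN_lb t (L / t) (by
      have := Nat.div_pos htL ht; omega)
    have he : t * (L / t - 1) = L - t := by
      rw [Nat.mul_sub]; omega
    rwa [he] at h
  have hSpos : 0 < pvSN t (L / t) := lt_of_lt_of_le (by positivity) hSlb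
  have hvpos : 0 < v := lt_of_lt_of_le (by positivity) hv1
  have hcpos : 0 < c := by nlinarith [hveq, hSpos, hvpos]
  have hclt : c < 10 ^ t := by
    have h1 : c * (10 : Int) ^ (L - t) ≤ c * pvSN t (L / t) :=
      mul_le_mul_of_nonneg_left hSlb (by omega)
    have h2 : c * (10 : Int) ^ (L - t) < 10 ^ L := by
      rw [← hveq] at h1; omega
    have h3 : (10 : Int) ^ L = 10 ^ (L - t) * 10 ^ t := by
      rw [← pow_add]; congr 1; omega
    nlinarith [pow_pos (show (0 : Int) < 10 by norm_num) (L - t)]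
  have hcge : (10 : Int) ^ (t - 1) ≤ c := by
    by_contra hcon
    push_neg at hcon
    have hta : (10 : Int) ^ t = 10 ^ (t - 1) * 10 := by
      rw [← pow_succ]; congr 1; omega
    have hLb : (10 : Int) ^ L = 10 ^ (L - 1) * 10 := by
      rw [← pow_succ]; congr 1; omega
    have ha1 : (1 : Int) ≤ 10 ^ (t - 1) := one_le_pow₀ (by norm_num)
    have hb1 : (1 : Int) ≤ 10 ^ (L - 1) := one_le_pow₀ (by norm_num)
    have hlhs : (10 : Int) ^ (L - 1) * ((10 : Int) ^ t - 1) ≤ v * ((10 : Int) ^ t - 1) :=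
      mul_le_mul_of_nonneg_right hv1 (by omega)
    have hrhs : ((10 : Int) ^ L - 1) * c ≤ ((10 : Int) ^ L - 1) * ((10 : Int) ^ (t - 1) - 1) :=
      mul_le_mul_of_nonneg_left (by omega) (by nlinarith)
    rw [hc] at hlhs
    nlinarith [hlhs, hrhs, hta, hLb, ha1, hb1]
  exact ⟨c, hcge, hclt, hveq⟩

theorem pv_pd_sub (N v : Int) (a b : Nat) (hab : a ≤ b)
    (ha : N ∣ v * ((10 : Int) ^ a - 1)) (hb : N ∣ v * ((10 : Int) ^ b - 1)) :
    N ∣ v * ((10 : Int) ^ (b - a) - 1) := by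
  have h1 : N ∣ v * ((10 : Int) ^ a - 1) * 10 ^ (b - a) := ha.mul_right _
  have he : v * ((10 : Int) ^ a - 1) * 10 ^ (b - a) = v * 10 ^ b - v * 10 ^ (b - a) := by
    have : (10 : Int) ^ a * 10 ^ (b - a) = 10 ^ b := by
      rw [← pow_add]; congr 1; omega
    linear_combination v * this
  rw [he] at h1
  have h2 : N ∣ v * (10 : Int) ^ b - v := by
    have : v * ((10 : Int) ^ b - 1) = v * 10 ^ b - v := by ring
    rwa [this] at hb
  have h3 : N ∣ (v * (10 : Int) ^ b - v) - (v * 10 ^ b - v * 10 ^ (b - a)) := h2.sub h1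
  have he2 : (v * (10 : Int) ^ b - v) - (v * 10 ^ b - v * 10 ^ (b - a)) =
      v * ((10 : Int) ^ (b - a) - 1) := by ring
  rwa [he2] at h3

theorem pv_pd_mod (N v : Int) (m n : Nat)
    (hm : N ∣ v * ((10 : Int) ^ m - 1)) (hn : N ∣ v * ((10 : Int) ^ n - 1)) :
    N ∣ v * ((10 : Int) ^ (n % m) - 1) := by
  rcases Nat.eq_zero_or_pos m with rfl | hm0
  · simpa using hn
  induction n using Nat.strong_induction_on with
  | _ n ih =>
    rcases Nat.lt_or_ge n m with h | h
    · rwa [Nat.mod_eq_of_lt h]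
    · rw [Nat.mod_eq_sub_mod h]
      exact ih (n - m) (by omega) (pv_pd_sub N v m n h hm hn)

theorem pv_pd_gcd (N v : Int) (p q : Nat)
    (hp : N ∣ v * ((10 : Int) ^ p - 1)) (hq : N ∣ v * ((10 : Int) ^ q - 1)) :
    N ∣ v * ((10 : Int) ^ Nat.gcd p q - 1) := by
  induction p, q using Nat.gcd.induction with
  | H0 n => simpa using hq
  | H1 m n hm0 ih =>
    rw [Nat.gcd_rec]
    exact ih (pv_pd_mod N v m n hp hq) hp

-- x (a p-digit number) is primitive: not a repetition of a shorter block
def pvPrim (p : Nat) (x : Int) : Prop :=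
  ¬ ∃ (d : Nat) (c : Int), 0 < d ∧ d < p ∧ d ∣ p ∧
    (10 : Int) ^ (d - 1) ≤ c ∧ c < 10 ^ d ∧ x = c * pvSN d (p / d)

theorem pv_main (p q k n : Nat) (x y : Int) (hq : 0 < q) (hqp : q ≤ p)
    (hk : 1 ≤ k) (hn : 1 ≤ n)
    (hx1 : (10 : Int) ^ (p - 1) ≤ x) (hx2 : x < 10 ^ p)
    (hy1 : (10 : Int) ^ (q - 1) ≤ y) (hy2 : y < 10 ^ q)
    (hprim : pvPrim p x) (heq : x * pvSN p k = y * pvSN q n) :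
    q = p ∧ y = x ∧ n = k := by
  have hp : 0 < p := lt_of_lt_of_le hq hqp
  have hv1 := pv_rep_lb p k x hp hk hx1
  have hv2 := pv_rep_ub p k x hk hx2
  have hw1 := pv_rep_lb q n y hq hn hy1
  have hw2 := pv_rep_ub q n y hn hy2
  rw [← heq] at hw1 hw2
  have hL : p * k = q * n :=
    pv_len_unique (p * k) (q * n) (x * pvSN p k) hv1 hv2 hw1 hw2
  rcases eq_or_lt_of_le hqp with rfl | hlt
  · have hkn : n = k := by
      have := Nat.eq_of_mul_eq_mul_left hq hL
      omega
    subst hkn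
    exact ⟨rfl, (mul_right_cancel₀ (ne_of_gt (pvSN_pos q n (by omega))) heq).symm, rfl⟩
  · exfalso
    have hNp : ((10 : Int) ^ (p * k) - 1) ∣ x * pvSN p k * ((10 : Int) ^ p - 1) :=
      ⟨x, by rw [show ((10 : Int) ^ (p * k) - 1) * x = x * ((10 : Int) ^ (p * k) - 1) from
          mul_comm _ _, ← pvSN_mul_eq p k]; ring⟩
    have hNq : ((10 : Int) ^ (p * k) - 1) ∣ x * pvSN p k * ((10 : Int) ^ q - 1) := by
      refine ⟨y, ?_⟩
      rw [heq, hL, show ((10 : Int) ^ (q * n) - 1) * y = y * ((10 : Int) ^ (q * n) - 1) from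
        mul_comm _ _, ← pvSN_mul_eq q n]
      ring
    have hNg := pv_pd_gcd _ _ p q hNp hNq
    set g := Nat.gcd p q with hgdef
    have hg0 : 0 < g := Nat.gcd_pos_of_pos_left q hp
    have hgq : g ≤ q := Nat.le_of_dvd hq (Nat.gcd_dvd_right p q)
    have hgp : g ∣ p := Nat.gcd_dvd_left p q
    have hgL : g ∣ p * k := hgp.mul_right k
    obtain ⟨c, hcge, hclt, hvdec⟩ := pv_decomp g (p * k) (x * pvSN p k) hg0 hgL
      (Nat.mul_pos hp (by omega)) hv1 hv2 hNg
    obtain ⟨m, hpm⟩ := hgp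
    have hmdiv : p / g = m := by rw [hpm, Nat.mul_div_cancel_left _ hg0]
    have hLdiv : p * k / g = m * k := by
      rw [hpm, Nat.mul_assoc, Nat.mul_div_cancel_left _ hg0]
    have hcomp := pvSN_comp g p k hg0 ⟨m, hpm⟩
    rw [hmdiv] at hcomp
    have hxdec : x = c * pvSN g m := by
      apply mul_right_cancel₀ (ne_of_gt (pvSN_pos p k (by omega)))
      calc x * pvSN p k = c * pvSN g (p * k / g) := hvdec
        _ = c * pvSN g (m * k) := by rw [hLdiv]
        _ = c * (pvSN g m * pvSN p k) := by rw [hcomp]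
        _ = c * pvSN g m * pvSN p k := by ring
    exact hprim ⟨g, c, hg0, by omega, ⟨m, hpm⟩, hcge, hclt, by rw [hmdiv]; exact hxdec⟩

-- ---------- Part 3: the generated-values invariant ----------

def pvGen (mv maxd : Int) (q : Nat) (y : Int) (n : Nat) (w : Int) : Prop :=
  0 < q ∧ (10 : Int) ^ (q - 1) ≤ y ∧ y < 10 ^ q ∧ 2 ≤ n ∧
    ((q * n : Nat) : Int) ≤ maxd ∧ w ≤ mv ∧ w = y * pvSN q n

def pvEarlier (p : Nat) (x : Int) (k : Nat) (q : Nat) (y : Int) (n : Nat) : Prop :=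
  q < p ∨ (q = p ∧ (y < x ∨ (y = x ∧ n < k)))

def pvE (mv maxd : Int) (p : Nat) (x : Int) (k : Nat) (w : Int) : Prop :=
  ∃ q y n, pvGen mv maxd q y n w ∧ pvEarlier p x k q y n

theorem pvE_succ (mv maxd : Int) (p : Nat) (x : Int) (k : Nat) (w : Int) :
    pvE mv maxd p x (k + 1) w ↔ pvE mv maxd p x k w ∨ pvGen mv maxd p x k w := by
  constructor
  · rintro ⟨q, y, n, hg, he⟩
    rcases he with h | ⟨rfl, h | ⟨rfl, hn⟩⟩
    · exact Or.inl ⟨q, y, n, hg, Or.inl h⟩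
    · exact Or.inl ⟨q, y, n, hg, Or.inr ⟨rfl, Or.inl h⟩⟩
    · rcases Nat.lt_or_ge n k with h | h
      · exact Or.inl ⟨q, y, n, hg, Or.inr ⟨rfl, Or.inr ⟨rfl, h⟩⟩⟩
      · have : n = k := by omega
        subst this
        exact Or.inr hg
  · rintro (⟨q, y, n, hg, he⟩ | hg)
    · refine ⟨q, y, n, hg, ?_⟩
      rcases he with h | ⟨rfl, h | ⟨rfl, hn⟩⟩
      · exact Or.inl h
      · exact Or.inr ⟨rfl, Or.inl h⟩
      · exact Or.inr ⟨rfl, Or.inr ⟨rfl, by omega⟩⟩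
    · exact ⟨p, x, k, hg, Or.inr ⟨rfl, Or.inr ⟨rfl, by omega⟩⟩⟩

theorem pvE_exit (mv maxd : Int) (p : Nat) (x : Int) (k : Nat) (w : Int)
    (hp : 0 < p) (hbig : maxd < ((p * k : Nat) : Int)) :
    pvE mv maxd p (x + 1) 2 w ↔ pvE mv maxd p x k w := by
  constructor
  · rintro ⟨q, y, n, ⟨hq, hy1, hy2, hn2, hqn, h6, h7⟩, he⟩
    rcases he with h | ⟨rfl, h | ⟨rfl, hn⟩⟩
    · exact ⟨q, y, n, ⟨hq, hy1, hy2, hn2, hqn, h6, h7⟩, Or.inl h⟩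
    · rcases lt_or_ge y x with h' | h'
      · exact ⟨q, y, n, ⟨hq, hy1, hy2, hn2, hqn, h6, h7⟩, Or.inr ⟨rfl, Or.inl h'⟩⟩
      · have hyx : y = x := by omega
        subst hyx
        have hnk : n < k := by
          by_contra hnk
          have hcast : ((q * k : Nat) : Int) ≤ ((q * n : Nat) : Int) := by
            have : q * k ≤ q * n := Nat.mul_le_mul_left q (by omega)
            exact_mod_cast this
          omega
        exact ⟨q, y, n, ⟨hq, hy1, hy2, hn2, hqn, h6, h7⟩, Or.inr ⟨rfl, Or.inr ⟨rfl, hnk⟩⟩⟩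
    · omega
  · rintro ⟨q, y, n, ⟨hq, hy1, hy2, hn2, hqn, h6, h7⟩, he⟩
    refine ⟨q, y, n, ⟨hq, hy1, hy2, hn2, hqn, h6, h7⟩, ?_⟩
    rcases he with h | ⟨rfl, h | ⟨rfl, hn⟩⟩
    · exact Or.inl h
    · exact Or.inr ⟨rfl, Or.inl (by omega)⟩
    · exact Or.inr ⟨rfl, Or.inl (by omega)⟩

theorem pvE_pat_ge (mv maxd : Int) (p : Nat) (x : Int) (w : Int)
    (hle : (10 : Int) ^ p ≤ x) :
    pvE mv maxd p x 2 w ↔ pvE mv maxd p ((10 : Int) ^ p) 2 w := by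
  constructor
  · rintro ⟨q, y, n, ⟨hq, hy1, hy2, hn2, hqn, h6, h7⟩, he⟩
    rcases he with h | ⟨rfl, h | ⟨rfl, hn⟩⟩
    · exact ⟨q, y, n, ⟨hq, hy1, hy2, hn2, hqn, h6, h7⟩, Or.inl h⟩
    · exact ⟨q, y, n, ⟨hq, hy1, hy2, hn2, hqn, h6, h7⟩, Or.inr ⟨rfl, Or.inl hy2⟩⟩
    · omega
  · rintro ⟨q, y, n, ⟨hq, hy1, hy2, hn2, hqn, h6, h7⟩, he⟩
    rcases he with h | ⟨rfl, h | ⟨rfl, hn⟩⟩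
    · exact ⟨q, y, n, ⟨hq, hy1, hy2, hn2, hqn, h6, h7⟩, Or.inl h⟩
    · exact ⟨q, y, n, ⟨hq, hy1, hy2, hn2, hqn, h6, h7⟩, Or.inr ⟨rfl, Or.inl (by omega)⟩⟩
    · omega

theorem pvE_next_pl (mv maxd : Int) (p : Nat) (w : Int) :
    pvE mv maxd (p + 1) ((10 : Int) ^ p) 2 w ↔ pvE mv maxd p ((10 : Int) ^ p) 2 w := by
  constructor
  · rintro ⟨q, y, n, ⟨hq, hy1, hy2, hn2, hqn, h6, h7⟩, he⟩
    rcases he with h | ⟨rfl, h | ⟨rfl, hn⟩⟩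
    · rcases Nat.lt_or_ge q p with h' | h'
      · exact ⟨q, y, n, ⟨hq, hy1, hy2, hn2, hqn, h6, h7⟩, Or.inl h'⟩
      · have hqp : q = p := by omega
        subst hqp
        exact ⟨q, y, n, ⟨hq, hy1, hy2, hn2, hqn, h6, h7⟩, Or.inr ⟨rfl, Or.inl hy2⟩⟩
    · exfalso
      have hge : (10 : Int) ^ p ≤ y := by
        have he' : p + 1 - 1 = p := by omega
        rwa [he'] at hy1
      omega
    · omega
  · rintro ⟨q, y, n, ⟨hq, hy1, hy2, hn2, hqn, h6, h7⟩, he⟩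
    rcases he with h | ⟨rfl, h | ⟨rfl, hn⟩⟩
    · exact ⟨q, y, n, ⟨hq, hy1, hy2, hn2, hqn, h6, h7⟩, Or.inl (by omega)⟩
    · exact ⟨q, y, n, ⟨hq, hy1, hy2, hn2, hqn, h6, h7⟩, Or.inl (by omega)⟩
    · omega

theorem pvE_empty (mv maxd : Int) (w : Int) : ¬ pvE mv maxd 1 1 2 w := by
  rintro ⟨q, y, n, ⟨hq, hy1, hy2, hn2, _, _, _⟩, he⟩
  rcases he with h | ⟨rfl, h | ⟨rfl, hn⟩⟩
  · omega
  · have h1 : (1 : Int) ≤ y := by simpa using hy1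
    omega
  · omega

theorem pv_firstocc (mv maxd : Int) (p k : Nat) (x : Int) (hp : 0 < p) (hk : 1 ≤ k)
    (hx1 : (10 : Int) ^ (p - 1) ≤ x) (hx2 : x < 10 ^ p) (hprim : pvPrim p x) :
    ¬ pvE mv maxd p x k (x * pvSN p k) := by
  rintro ⟨q, y, n, ⟨hq, hy1, hy2, hn2, _, _, hw⟩, he⟩
  have hqp : q ≤ p := by rcases he with h | ⟨rfl, _⟩ <;> omega
  obtain ⟨rfl, rfl, rfl⟩ :=
    pv_main p q k n x y hq hqp hk (by omega) hx1 hx2 hy1 hy2 hprim hw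
  rcases he with h | ⟨_, h | ⟨_, h⟩⟩ <;> omega

theorem pv_np_mem (mv maxd : Int) (p k : Nat) (x : Int) (hp : 0 < p) (hk : 2 ≤ k)
    (hx1 : (10 : Int) ^ (p - 1) ≤ x) (hnp : ¬ pvPrim p x)
    (hmaxd : ((p * k : Nat) : Int) ≤ maxd) (hmv : x * pvSN p k ≤ mv) :
    pvE mv maxd p x k (x * pvSN p k) := by
  rw [pvPrim, not_not] at hnp
  obtain ⟨d, c, hd0, hdp, hdvd, hc1, hc2, hxe⟩ := hnp
  have hm2 : 2 ≤ p / d := by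
    rcases hdvd with ⟨m, rfl⟩
    rw [Nat.mul_div_cancel_left m hd0]
    rcases Nat.lt_or_ge m 2 with h | h
    · interval_cases m <;> omega
    · exact h
  refine ⟨d, c, p / d * k, ⟨hd0, hc1, hc2, ?_, ?_, hmv, ?_⟩, Or.inl hdp⟩
  · calc 2 = 2 * 1 := by omega
      _ ≤ p / d * k := Nat.mul_le_mul hm2 (by omega)
  · have : d * (p / d * k) = p * k := by
      rw [← Nat.mul_assoc, Nat.mul_div_cancel' hdvd]
    rw [this]
    exact hmaxd
  · rw [hxe, mul_assoc, pvSN_comp d p k hd0 hdvd]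

theorem pv_np_succ_iff (mv maxd : Int) (p k : Nat) (x : Int) (hp : 0 < p) (hk : 2 ≤ k)
    (hx1 : (10 : Int) ^ (p - 1) ≤ x) (hnp : ¬ pvPrim p x) (w : Int) :
    pvE mv maxd p x (k + 1) w ↔ pvE mv maxd p x k w := by
  rw [pvE_succ]
  constructor
  · rintro (h | hg)
    · exact h
    · obtain ⟨_, _, _, _, hmaxd, hmv, hw⟩ := hg
      rw [hw]
      exact pv_np_mem mv maxd p k x hp hk hx1 hnp hmaxd (hw ▸ hmv)
  · exact Or.inl

-- ---------- Part 4: Set.add helpers ----------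

theorem pv_add_not_mem (s : PySem.Set Int) (v : Int) (h : v ∉ s) :
    PySem.Set.add s v = s ++ [v] := by
  simp [PySem.Set.add, h]

theorem pv_add_mem (s : PySem.Set Int) (v : Int) (h : v ∈ s) :
    PySem.Set.add s v = s := by
  simp [PySem.Set.add, h]

-- ---------- Part 5: the primitivity test ----------

theorem pv_isPrim_iff (p : Nat) (hp : 0 < p) (x : Int)
    (hx1 : (10 : Int) ^ (p - 1) ≤ x) (hx2 : x < 10 ^ p) :
    pvIsPrim (p : Int) x = true ↔ pvPrim p x := by
  unfold pvIsPrim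
  rw [List.all_eq_true]
  constructor
  · intro hall
    rintro ⟨d, c, hd0, hdp, hdvd, hc1, hc2, hxe⟩
    have hmem : (d : Int) ∈ PySem.List.pyRange 1 (p : Int) 1 :=
      PySem.List.mem_pyRange_one.mpr ⟨by exact_mod_cast hd0, by exact_mod_cast hdp⟩
    have h := hall _ hmem
    simp only [Bool.not_eq_eq_eq_not, Bool.not_true, Bool.and_eq_false_iff,
      beq_eq_false_iff_ne, ne_eq] at h
    obtain ⟨m, hpm⟩ := hdvd
    have hm1 : 1 ≤ m := by
      rcases Nat.eq_zero_or_pos m with rfl | h'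
      · omega
      · exact h'
    have hmd : p / d = m := by rw [hpm, Nat.mul_div_cancel_left _ hd0]
    have hmod : PySem.Int.mod (p : Int) ((d : Nat) : Int) = 0 := by
      rw [PySem.Int.mod_eq_zero_iff_dvd]
      exact_mod_cast (⟨m, hpm⟩ : d ∣ p)
    have htn : ((d : Int)).toNat = d := Int.toNat_natCast d
    have htn2 : (((p : Int)) - (d : Int)).toNat = p - d := by omega
    have htn3 : ((p : Int)).toNat = p := Int.toNat_natCast p
    have hfloor : PySem.Int.floordiv x ((10 : Int) ^ (p - d)) = c := by
      rw [PySem.Int.floordiv_eq_ediv_of_pos (by positivity)]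
      have hexp : p - d = d * (m - 1) := by
        have := Nat.mul_sub d m 1
        omega
      rw [hexp, hxe, hmd]
      exact pv_floor_block d m c hd0 hm1 hc1 hc2
    have heqn : x * ((10 : Int) ^ d - 1) =
        PySem.Int.floordiv x ((10 : Int) ^ (p - d)) * ((10 : Int) ^ p - 1) := by
      rw [hfloor, hxe, hmd, mul_assoc, mul_comm (pvSN d m) ((10 : Int) ^ d - 1),
        pvSN_mul_eq, hpm]
    rcases h with h | h
    · exact h hmod
    · rw [htn, htn2, htn3] at h
      exact h heqn
  · intro hprim d hd
    obtain ⟨hd1, hdp⟩ := PySem.List.mem_pyRange_one.mp hd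
    simp only [Bool.not_eq_eq_eq_not, Bool.not_true, Bool.and_eq_false_iff,
      beq_eq_false_iff_ne, ne_eq]
    by_cases hm : PySem.Int.mod (p : Int) d = 0
    · right
      intro heqn
      have hdd : d.toNat ∣ p := by
        have h' : d ∣ (p : Int) := (PySem.Int.mod_eq_zero_iff_dvd _ _).mp hm
        have h2 : ((d.toNat : Nat) : Int) ∣ ((p : Nat) : Int) := by
          rwa [Int.toNat_of_nonneg (by omega : (0 : Int) ≤ d)]
        exact_mod_cast h2
      have hD0 : 0 < d.toNat := by omega
      have hDp : d.toNat < p := by omega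
      have hdiv : ((10 : Int) ^ p - 1) ∣ x * ((10 : Int) ^ d.toNat - 1) := by
        refine ⟨PySem.Int.floordiv x ((10 : Int) ^ ((p : Int) - d).toNat), ?_⟩
        rw [Int.toNat_natCast] at heqn
        rw [heqn]
        ring
      obtain ⟨c, hc1, hc2, hxe⟩ := pv_decomp d.toNat p x hD0 hdd hp hx1 hx2 hdiv
      exact hprim ⟨d.toNat, c, hD0, hDp, hdd, hc1, hc2, hxe⟩
    · exact Or.inl hm

-- ---------- Part 6: the loop equivalences ----------

theorem pv_loop_prim (mv maxd : Int) (p : Nat) (hp : 0 < p) (x : Int)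
    (hx1 : (10 : Int) ^ (p - 1) ≤ x) (hx2 : x < 10 ^ p) (hprim : pvPrim p x) :
    ∀ (fuelB fuelC k : Nat) (acc : List Int), 2 ≤ k →
      (maxd + 1 - ((p * k : Nat) : Int)).toNat ≤ fuelB →
      (maxd + 1 - ((p * k : Nat) : Int)).toNat ≤ fuelC →
      (∀ w, w ∈ acc ↔ pvE mv maxd p x k w) →
      pvWhileB fuelB maxd mv ((10 : Int) ^ p) x (p : Int) (x * pvSN p k) ((p * k : Nat) : Int) acc
        = pvWhileC fuelC maxd mv ((10 : Int) ^ p) x (p : Int) (x * pvSN p k) ((p * k : Nat) : Int) acc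
      ∧ ∀ w, w ∈ pvWhileC fuelC maxd mv ((10 : Int) ^ p) x (p : Int) (x * pvSN p k)
          ((p * k : Nat) : Int) acc ↔ pvE mv maxd p (x + 1) 2 w := by
  intro fuelB
  induction fuelB with
  | zero =>
    intro fuelC k acc hk hfB hfC hinv
    have hbig : maxd < ((p * k : Nat) : Int) := by omega
    rw [pvWhileB_exit _ _ _ _ _ _ _ _ _ (by omega), pvWhileC_exit _ _ _ _ _ _ _ _ _ (by omega)]
    exact ⟨rfl, fun w => (hinv w).trans (pvE_exit mv maxd p x k w hp hbig).symm⟩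
  | succ fuelB ih =>
    intro fuelC k acc hk hfB hfC hinv
    by_cases hcond : ((p * k : Nat) : Int) ≤ maxd
    · obtain ⟨fuelC', rfl⟩ : ∃ m, fuelC = m + 1 := ⟨fuelC - 1, by omega⟩
      simp only [pvWhileB, pvWhileC]
      rw [if_pos hcond, if_pos hcond]
      have hval : x * pvSN p k * (10 : Int) ^ p + x = x * pvSN p (k + 1) := by
        rw [pvSN_succ]; ring
      have hdig : ((p * k : Nat) : Int) + (p : Int) = ((p * (k + 1) : Nat) : Int) := by
        push_cast; ring
      have h1p : (1 : Int) ≤ (p : Int) := by exact_mod_cast hp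
      have hfB' : (maxd + 1 - ((p * (k + 1) : Nat) : Int)).toNat ≤ fuelB := by omega
      have hfC' : (maxd + 1 - ((p * (k + 1) : Nat) : Int)).toNat ≤ fuelC' := by omega
      by_cases hle : x * pvSN p k ≤ mv
      · rw [if_pos hle, if_pos hle]
        have hnm : x * pvSN p k ∉ acc := fun hmem =>
          pv_firstocc mv maxd p k x hp (by omega) hx1 hx2 hprim ((hinv _).mp hmem)
        rw [pv_add_not_mem acc _ hnm]
        have hinv' : ∀ w, w ∈ acc ++ [x * pvSN p k] ↔ pvE mv maxd p x (k + 1) w := by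
          intro w
          rw [List.mem_append, List.mem_singleton, pvE_succ, hinv]
          apply or_congr_right
          constructor
          · rintro rfl; exact ⟨hp, hx1, hx2, hk, hcond, hle, rfl⟩
          · rintro ⟨_, _, _, _, _, _, hw⟩; exact hw
        rw [hval, hdig]
        exact ih fuelC' (k + 1) (acc ++ [x * pvSN p k]) (by omega) hfB' hfC' hinv'
      · rw [if_neg hle, if_neg hle]
        have hinv' : ∀ w, w ∈ acc ↔ pvE mv maxd p x (k + 1) w := by
          intro w
          rw [pvE_succ, hinv]
          constructor
          · exact Or.inl
          · rintro (h | ⟨_, _, _, _, _, hmv', hw⟩)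
            · exact h
            · exact absurd (hw ▸ hmv') hle
        rw [hval, hdig]
        exact ih fuelC' (k + 1) acc (by omega) hfB' hfC' hinv'
    · rw [pvWhileB_exit _ _ _ _ _ _ _ _ _ hcond, pvWhileC_exit _ _ _ _ _ _ _ _ _ hcond]
      exact ⟨rfl, fun w => (hinv w).trans (pvE_exit mv maxd p x k w hp (by omega)).symm⟩

theorem pv_loop_np (mv maxd : Int) (p : Nat) (hp : 0 < p) (x : Int)
    (hx1 : (10 : Int) ^ (p - 1) ≤ x) (hnp : ¬ pvPrim p x) :
    ∀ (fuel k : Nat) (acc : List Int), 2 ≤ k →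
      (maxd + 1 - ((p * k : Nat) : Int)).toNat ≤ fuel →
      (∀ w, w ∈ acc ↔ pvE mv maxd p x k w) →
      pvWhileB fuel maxd mv ((10 : Int) ^ p) x (p : Int) (x * pvSN p k) ((p * k : Nat) : Int) acc
        = acc
      ∧ ∀ w, w ∈ acc ↔ pvE mv maxd p (x + 1) 2 w := by
  intro fuel
  induction fuel with
  | zero =>
    intro k acc hk hf hinv
    have hbig : maxd < ((p * k : Nat) : Int) := by omega
    rw [pvWhileB_exit _ _ _ _ _ _ _ _ _ (by omega)]
    exact ⟨rfl, fun w => (hinv w).trans (pvE_exit mv maxd p x k w hp hbig).symm⟩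
  | succ fuel ih =>
    intro k acc hk hf hinv
    by_cases hcond : ((p * k : Nat) : Int) ≤ maxd
    · simp only [pvWhileB]
      rw [if_pos hcond]
      have hval : x * pvSN p k * (10 : Int) ^ p + x = x * pvSN p (k + 1) := by
        rw [pvSN_succ]; ring
      have hdig : ((p * k : Nat) : Int) + (p : Int) = ((p * (k + 1) : Nat) : Int) := by
        push_cast; ring
      have h1p : (1 : Int) ≤ (p : Int) := by exact_mod_cast hp
      have hf' : (maxd + 1 - ((p * (k + 1) : Nat) : Int)).toNat ≤ fuel := by omega
      have hinv' : ∀ w, w ∈ acc ↔ pvE mv maxd p x (k + 1) w := fun w =>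
        (hinv w).trans (pv_np_succ_iff mv maxd p k x hp hk hx1 hnp w).symm
      by_cases hle : x * pvSN p k ≤ mv
      · rw [if_pos hle,
          pv_add_mem acc _ ((hinv _).mpr (pv_np_mem mv maxd p k x hp hk hx1 hnp hcond hle))]
        rw [hval, hdig]
        exact ih (k + 1) acc (by omega) hf' hinv'
      · rw [if_neg hle, hval, hdig]
        exact ih (k + 1) acc (by omega) hf' hinv'
    · rw [pvWhileB_exit _ _ _ _ _ _ _ _ _ hcond]
      exact ⟨rfl, fun w => (hinv w).trans (pvE_exit mv maxd p x k w hp (by omega)).symm⟩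

theorem pv_patloop (mv maxd : Int) (p : Nat) (hp : 0 < p) :
    ∀ (fuel : Nat) (x : Int) (acc : List Int), (10 : Int) ^ (p - 1) ≤ x →
      ((10 : Int) ^ p - x).toNat ≤ fuel →
      (∀ w, w ∈ acc ↔ pvE mv maxd p x 2 w) →
      (PySem.List.pyRange x ((10 : Int) ^ p) 1).foldl
          (fun acc pat => pvWhileB (maxd + 1).toNat maxd mv ((10 : Int) ^ p) pat (p : Int)
            (pat * (10 : Int) ^ p + pat) (2 * (p : Int)) acc) acc
        = (PySem.List.pyRange x ((10 : Int) ^ p) 1).foldl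
          (fun acc pat => if pvIsPrim (p : Int) pat then pvWhileC (maxd + 1).toNat maxd mv
            ((10 : Int) ^ p) pat (p : Int) (pat * (10 : Int) ^ p + pat) (2 * (p : Int)) acc
            else acc) acc
      ∧ ∀ w, w ∈ (PySem.List.pyRange x ((10 : Int) ^ p) 1).foldl
          (fun acc pat => if pvIsPrim (p : Int) pat then pvWhileC (maxd + 1).toNat maxd mv
            ((10 : Int) ^ p) pat (p : Int) (pat * (10 : Int) ^ p + pat) (2 * (p : Int)) acc
            else acc) acc ↔
          pvE mv maxd p ((10 : Int) ^ p) 2 w := by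
  intro fuel
  induction fuel with
  | zero =>
    intro x acc hx hf hinv
    have hge : (10 : Int) ^ p ≤ x := by omega
    rw [PySem.List.pyRange_one_eq_nil (by omega)]
    exact ⟨rfl, fun w => (hinv w).trans (pvE_pat_ge mv maxd p x w hge)⟩
  | succ fuel ih =>
    intro x acc hx hf hinv
    by_cases hlt : x < (10 : Int) ^ p
    · rw [PySem.List.pyRange_one_cons hlt]
      simp only [List.foldl_cons]
      have hval0 : x * (10 : Int) ^ p + x = x * pvSN p 2 := by
        have h2 : pvSN p 2 = (10 : Int) ^ p + 1 := by
          unfold pvSN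
          rw [Finset.sum_range_succ, Finset.sum_range_one, pow_one, pow_zero]
          exact add_comm 1 _
        rw [h2]; ring
      have hdig0 : 2 * (p : Int) = ((p * 2 : Nat) : Int) := by push_cast; ring
      have hfuel2 : (maxd + 1 - ((p * 2 : Nat) : Int)).toNat ≤ (maxd + 1).toNat := by omega
      by_cases hpr : pvPrim p x
      · have hIs : pvIsPrim (p : Int) x = true := (pv_isPrim_iff p hp x hx hlt).mpr hpr
        rw [if_pos hIs]
        obtain ⟨heqw, hpost⟩ := pv_loop_prim mv maxd p hp x hx hlt hpr
          ((maxd + 1).toNat) ((maxd + 1).toNat) 2 acc (le_refl 2) hfuel2 hfuel2 hinv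
        rw [← hval0, ← hdig0] at heqw hpost
        rw [heqw]
        exact ih (x + 1) _ (by omega) (by omega) hpost
      · have hIs : ¬ (pvIsPrim (p : Int) x = true) := fun h =>
          hpr ((pv_isPrim_iff p hp x hx hlt).mp h)
        rw [if_neg hIs]
        obtain ⟨heqw, hpost⟩ := pv_loop_np mv maxd p hp x hx hpr
          ((maxd + 1).toNat) 2 acc (le_refl 2) hfuel2 hinv
        rw [← hval0, ← hdig0] at heqw
        rw [heqw]
        exact ih (x + 1) acc (by omega) (by omega) hpost
    · rw [PySem.List.pyRange_one_eq_nil (by omega)]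
      exact ⟨rfl, fun w => (hinv w).trans (pvE_pat_ge mv maxd p x w (by omega))⟩

theorem pv_plloop (mv maxd D : Int) :
    ∀ (fuel : Nat) (pl : Int) (acc : List Int), 1 ≤ pl → (D + 1 - pl).toNat ≤ fuel →
      (∀ w, w ∈ acc ↔ pvE mv maxd pl.toNat ((10 : Int) ^ (pl.toNat - 1)) 2 w) →
      (PySem.List.pyRange pl (D + 1) 1).foldl
          (fun invalid_ids pattern_len =>
            (PySem.List.pyRange (PySem.Int.floordiv ((10 : Int) ^ pattern_len.toNat) 10)
                ((10 : Int) ^ pattern_len.toNat) 1).foldl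
              (fun invalid_ids pat => pvWhileB (maxd + 1).toNat maxd mv
                ((10 : Int) ^ pattern_len.toNat) pat pattern_len
                (pat * (10 : Int) ^ pattern_len.toNat + pat) (2 * pattern_len) invalid_ids)
              invalid_ids) acc
        = (PySem.List.pyRange pl (D + 1) 1).foldl
          (fun out pl' =>
            (PySem.List.pyRange (PySem.Int.floordiv ((10 : Int) ^ pl'.toNat) 10)
                ((10 : Int) ^ pl'.toNat) 1).foldl
              (fun out pat => if pvIsPrim pl' pat then pvWhileC (maxd + 1).toNat maxd mv
                ((10 : Int) ^ pl'.toNat) pat pl' (pat * (10 : Int) ^ pl'.toNat + pat)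
                (2 * pl') out else out)
              out) acc := by
  intro fuel
  induction fuel with
  | zero =>
    intro pl acc h1 hf hinv
    rw [PySem.List.pyRange_one_eq_nil (by omega)]
    rfl
  | succ fuel ih =>
    intro pl acc h1 hf hinv
    by_cases hlt : pl < D + 1
    · rw [PySem.List.pyRange_one_cons hlt]
      simp only [List.foldl_cons]
      have hP1 : 0 < pl.toNat := by omega
      have hplP : ((pl.toNat : Nat) : Int) = pl := Int.toNat_of_nonneg (by omega)
      have hstart : PySem.Int.floordiv ((10 : Int) ^ pl.toNat) 10 = (10 : Int) ^ (pl.toNat - 1) := by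
        have h := pv_start_eq pl (by omega)
        rwa [show (pl - 1).toNat = pl.toNat - 1 by omega] at h
      obtain ⟨heqw, hpost⟩ := pv_patloop mv maxd pl.toNat hP1
        (((10 : Int) ^ pl.toNat - (10 : Int) ^ (pl.toNat - 1)).toNat)
        ((10 : Int) ^ (pl.toNat - 1)) acc (le_refl _) (le_refl _) hinv
      rw [hplP] at heqw hpost
      rw [hstart, heqw]
      have hiff : ∀ w, pvE mv maxd pl.toNat ((10 : Int) ^ pl.toNat) 2 w ↔
          pvE mv maxd (pl + 1).toNat ((10 : Int) ^ ((pl + 1).toNat - 1)) 2 w := by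
        intro w
        rw [show (pl + 1).toNat = pl.toNat + 1 by omega,
          show pl.toNat + 1 - 1 = pl.toNat by omega]
        exact (pvE_next_pl mv maxd pl.toNat w).symm
      exact ih (pl + 1) _ (by omega) (by omega) (fun w => (hpost w).trans (hiff w))
    · rw [PySem.List.pyRange_one_eq_nil (by omega)]
      rfl

-- ---------- Part 7: nodup ----------

theorem pv_nodup_foldl {α β : Type} (l : List β) (f : List α → β → List α)
    (hf : ∀ a x, a.Nodup → (f a x).Nodup) :
    ∀ acc : List α, acc.Nodup → (l.foldl f acc).Nodup := by
  induction l with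
  | nil => intro acc h; exact h
  | cons x t ih => intro acc h; exact ih (f acc x) (hf acc x h)

theorem pvWhileB_nodup : ∀ (n : Nat) (maxd mv shift pat plen val digits : Int)
    (acc : PySem.Set Int), acc.Nodup →
    (pvWhileB n maxd mv shift pat plen val digits acc).Nodup := by
  intro n
  induction n with
  | zero =>
    intro maxd mv shift pat plen val digits acc h
    exact h
  | succ n ih =>
    intro maxd mv shift pat plen val digits acc h
    simp only [pvWhileB]
    split
    · apply ih
      split
      · exact PySem.Set.nodup_add acc val h
      · exact h
    · exact h

theorem pvMid_nodup (mv : Int) : (pvMid mv).Nodup := by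
  unfold pvMid
  apply pv_nodup_foldl _ _ ?_ _ List.nodup_nil
  intro a pl ha
  apply pv_nodup_foldl _ _ ?_ _ ha
  intro b pat hb
  exact pvWhileB_nodup _ _ _ _ _ _ _ _ _ hb

-- ---------- Part 8: the verdict ----------

theorem pv_mid_eq_alt (mv : Int) : pvMid mv = generate_invalid_ids_alt mv := by
  have hA := pvMid_nodup mv
  unfold pvMid at hA ⊢
  unfold generate_invalid_ids_alt
  have hinv0 : ∀ w, w ∈ (PySem.Set.empty : PySem.Set Int) ↔
      pvE mv (PySem.Str.len (PySem.Int.toStr mv)) ((1 : Int)).toNat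
        ((10 : Int) ^ (((1 : Int)).toNat - 1)) 2 w := by
    intro w
    simp only [show ((1 : Int)).toNat = 1 from rfl, show (1 : Nat) - 1 = 0 from rfl, pow_zero]
    constructor
    · intro h
      exact absurd h (List.not_mem_nil)
    · intro h
      exact absurd h (pvE_empty mv _ w)
  have hfold := pv_plloop mv (PySem.Str.len (PySem.Int.toStr mv))
    (PySem.Int.floordiv (PySem.Str.len (PySem.Int.toStr mv)) 2)
    ((PySem.Int.floordiv (PySem.Str.len (PySem.Int.toStr mv)) 2 + 1 - 1).toNat) 1
    PySem.Set.empty (le_refl 1) (le_refl _) hinv0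
  rw [hfold] at hA ⊢
  exact (PySem.Set.ofList_eq_self_of_nodup _ hA).symm

-- ===== VERDICT (by name: the statement is the Claim_ definition above) =====
theorem generate_invalid_ids_spec : Claim_equal_generate_invalid_ids := by
  intro mv _
  unfold Spec_generate_invalid_ids
  rw [pv_A_eq_mid, pv_mid_eq_alt]
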